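-- pv_equiv track=rewrite | github.com/JayTongue/advent_of_code | 2023/13_2.py | find_verts
-- ===== SOURCE A (Python) =====
-- def find_verts(board):
--     verts = set()
--     row_len = len(board[0])
--     for i in range(1, row_len):
--         match = True
--         for row in board:
--             before, after = row[:i][::-1], row[i:]
--             if not (before[:len(after)] == after or after[:len(before)] == before):
--                 match = False
--                 break
--         if match:
--             verts.add(i)
--     return verts
-- ===== SOURCE B (Python) =====
-- def find_verts(board):
--     n0 = len(board[0])
--     cands = range(1, n0)
--     for row in board:
--         n = len(row)
--         cands = [i for i in cands
--                  if all(row[i - 1 - k] == row[i + k] for k in range(min(i, n - i)))]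
--     return set(cands)
-- ===== Notes on version B (the rewrite author's own statement) =====
-- stated objective: alternative
-- what changed: B swaps the loop nesting: instead of testing every candidate column against all rows with reversed-slice prefix comparisons, it keeps a shrinking candidate list and filters it row by row using direct paired character comparisons around the mirror line (no slice/reverse copies).
-- outside the precondition, e.g. on find_verts([]): A raises IndexError, B raises IndexError
import Mathlib
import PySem

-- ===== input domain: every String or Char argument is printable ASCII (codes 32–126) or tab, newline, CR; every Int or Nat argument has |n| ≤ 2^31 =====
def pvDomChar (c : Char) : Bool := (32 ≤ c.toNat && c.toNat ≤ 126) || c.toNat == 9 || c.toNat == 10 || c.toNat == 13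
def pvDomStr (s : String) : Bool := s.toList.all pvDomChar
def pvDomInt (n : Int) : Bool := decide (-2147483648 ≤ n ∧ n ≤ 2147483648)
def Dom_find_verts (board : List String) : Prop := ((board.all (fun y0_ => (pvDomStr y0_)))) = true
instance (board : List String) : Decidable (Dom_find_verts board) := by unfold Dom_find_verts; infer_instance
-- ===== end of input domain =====

-- B is an alternative implementation: it filters a shrinking candidate list row by row with
-- direct paired character comparisons, instead of A's per-candidate reversed-slice prefix test.

-- ===== PORT A =====
-- before, after = row[:i][::-1], row[i:];  before[:len(after)] == after or after[:len(before)] == before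
def find_verts_check (i : Int) (row : String) : Bool :=
  let before := (PySem.List.slice row.toList none (some i)).reverse  -- row[:i][::-1]
  let after := PySem.List.slice row.toList (some i) none             -- row[i:]
  (PySem.List.slice before none (some (after.length : Int)) == after) ||
  (PySem.List.slice after none (some (before.length : Int)) == before)

-- the inner 'for row in board' loop with its break
def find_verts_inner (i : Int) : List String → Bool
  | [] => true
  | row :: rest => if !(find_verts_check i row) then false else find_verts_inner i rest

def find_verts (board : List String) : List Int :=
  -- range(1, len(board[0])); Pre_ excludes board = [] (IndexError)
  (PySem.List.pyRange 1 ((board.headD "").toList.length : Int) 1).foldl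
    (fun verts i => if find_verts_inner i board then PySem.Set.add verts i else verts)
    PySem.Set.empty

-- ===== PORT B =====
-- all(row[i-1-k] == row[i+k] for k in range(min(i, n-i)))
def find_verts_rowOK (row : List Char) (i : Int) : Bool :=
  (PySem.List.pyRange 0 (min i ((row.length : Int) - i)) 1).all
    (fun k => PySem.List.pyGet? row (i - 1 - k) == PySem.List.pyGet? row (i + k))

def find_verts_alt (board : List String) : List Int :=
  -- cands = range(1, len(board[0])); Pre_ excludes board = [] (IndexError)
  PySem.Set.ofList
    (board.foldl (fun cs row => cs.filter (fun i => find_verts_rowOK row.toList i))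
      (PySem.List.pyRange 1 ((board.headD "").toList.length : Int) 1))

-- ===== PRECONDITION & SPEC =====
-- Pre_ excludes only the empty board, on which A raises IndexError (len(board[0])).
def Pre_find_verts (board : List String) : Prop := board ≠ []
instance (board : List String) : Decidable (Pre_find_verts board) := by unfold Pre_find_verts; infer_instance
def pvWitness_find_verts : List String := ["#.##.", "..##."]

def Spec_find_verts (board : List String) (out : List Int) : Prop := out = find_verts_alt board
instance (board : List String) (out : List Int) : Decidable (Spec_find_verts board out) := by unfold Spec_find_verts; infer_instance

-- ===== CLAIM (what is proved, stated in full; the proofs are below) =====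
def Claim_equal_find_verts : Prop := ∀ (board : List String), Dom_find_verts board → Pre_find_verts board → Spec_find_verts board (find_verts board)

-- ===== LEMMAS AND PROOFS =====

-- A's inner loop is an 'all' over the rows
theorem find_verts_inner_eq_all (i : Int) (board : List String) :
    find_verts_inner i board = board.all (fun row => find_verts_check i row) := by
  induction board with
  | nil => rfl
  | cons row rest ih =>
      simp only [find_verts_inner, List.all_cons, ih]
      by_cases h : find_verts_check i row = true <;> simp [h]

-- iterated filtering over the rows is one filter by the conjunction
theorem foldl_filter_eq_filter_all {α β : Type} (Q : β → α → Bool) (l : List β) (R : List α) :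
    l.foldl (fun cs row => cs.filter (Q row)) R
      = R.filter (fun i => l.all (fun row => Q row i)) := by
  induction l generalizing R with
  | nil => simp
  | cons row rest ih =>
      simp only [List.foldl_cons, ih, List.filter_filter, List.all_cons]
      apply List.filter_congr
      intro x _
      by_cases h : Q row x = true <;> simp [h, Bool.and_comm]

-- A's conditional Set.add fold is a fold of add over the filtered list
theorem foldl_add_if_eq_foldl_filter {α : Type} [BEq α] (P : α → Bool) (l : List α)
    (s : PySem.Set α) :
    l.foldl (fun s i => if P i then PySem.Set.add s i else s) s
      = (l.filter P).foldl PySem.Set.add s := by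
  induction l generalizing s with
  | nil => rfl
  | cons x xs ih =>
      by_cases h : P x = true <;> simp [h, ih]

-- "one is a prefix of the other" = "agreement on every common index"
theorem prefix_or_agree (x y : List Char) :
    ((x.take y.length == y) || (y.take x.length == x)) = true ↔
      (∀ k, k < min x.length y.length → x[k]? = y[k]?) := by
  simp only [Bool.or_eq_true, beq_iff_eq]
  constructor
  · rintro (h | h) k hk
    · have h2 := congrArg (fun l => l[k]?) h
      simp only [List.getElem?_take] at h2
      rwa [if_pos (by omega)] at h2
    · have h2 := congrArg (fun l => l[k]?) h
      simp only [List.getElem?_take] at h2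
      rw [if_pos (by omega)] at h2
      exact h2.symm
  · intro h
    rcases le_total y.length x.length with hle | hle
    · left
      apply List.ext_getElem?
      intro k
      simp only [List.getElem?_take]
      split_ifs with hk
      · exact h k (by omega)
      · exact (List.getElem?_eq_none (by omega)).symm
    · right
      apply List.ext_getElem?
      intro k
      simp only [List.getElem?_take]
      split_ifs with hk
      · exact (h k (by omega)).symm
      · exact (List.getElem?_eq_none (by omega)).symm

-- both per-row conditions say: characters paired across the mirror line agree
theorem check_eq_rowOK (i : Int) (hi : 1 ≤ i) (row : String) :
    find_verts_check i row = find_verts_rowOK row.toList i := by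
  have h0 : (0 : Int) ≤ i := by omega
  set c := row.toList with hc
  rw [Bool.eq_iff_iff]
  unfold find_verts_check find_verts_rowOK
  simp only
  rw [PySem.List.slice_to c h0, PySem.List.slice_from c h0,
      PySem.List.slice_to_natCast, PySem.List.slice_to_natCast]
  rw [prefix_or_agree]
  simp only [List.all_eq_true, PySem.List.mem_pyRange_one, List.length_reverse,
    List.length_take, List.length_drop, beq_iff_eq]
  set t := i.toNat with ht
  constructor
  · intro h x hx
    obtain ⟨hx0, hxm⟩ := hx
    have hin : i < (c.length : Int) := by omega
    have htN : t ≤ c.length := by omega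
    have hk1 : x.toNat < t := by omega
    have hk2 : x.toNat < c.length - t := by omega
    have h2 := h x.toNat (by omega)
    rw [List.getElem?_reverse (by simp only [List.length_take]; omega),
        List.getElem?_drop, List.getElem?_take] at h2
    simp only [List.length_take, Nat.min_eq_left htN] at h2
    rw [if_pos (by omega)] at h2
    rw [PySem.List.pyGet?_of_nonneg _ (by omega), PySem.List.pyGet?_of_nonneg _ (by omega)]
    have e1 : (i - 1 - x).toNat = t - 1 - x.toNat := by omega
    have e2 : (i + x).toNat = t + x.toNat := by omega
    rw [e1, e2]
    exact h2
  · intro h k hk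
    have hk1 : k < t := by omega
    have hk2 : k < c.length - t := by omega
    have htN : t ≤ c.length := by omega
    have h2 := h (k : Int) ⟨by omega, by omega⟩
    rw [PySem.List.pyGet?_of_nonneg _ (by omega), PySem.List.pyGet?_of_nonneg _ (by omega)] at h2
    have e1 : (i - 1 - (k : Int)).toNat = t - 1 - k := by omega
    have e2 : (i + (k : Int)).toNat = t + k := by omega
    rw [e1, e2] at h2
    rw [List.getElem?_reverse (by simp only [List.length_take]; omega),
        List.getElem?_drop, List.getElem?_take]
    simp only [List.length_take, Nat.min_eq_left htN]
    rw [if_pos (by omega)]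
    exact h2

-- ===== VERDICT (by name: the statement is the Claim_ definition above) =====
theorem find_verts_spec : Claim_equal_find_verts := by
  intro board _ _
  unfold Spec_find_verts find_verts find_verts_alt
  rw [foldl_filter_eq_filter_all, foldl_add_if_eq_foldl_filter]
  have hempty : (PySem.Set.empty : PySem.Set Int) = [] := rfl
  rw [hempty, ← PySem.Set.ofList_eq_foldl]
  congr 1
  apply List.filter_congr
  intro i hi
  have h1 : 1 ≤ i := (PySem.List.mem_pyRange_one.mp hi).1
  rw [find_verts_inner_eq_all]
  simp only [check_eq_rowOK i h1]
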